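-- pv_equiv track=rewrite | github.com/xab901/Applied-Cryptology-ClassFile | Playfair.py | preprocess_plaintext
-- ===== SOURCE A (Python) =====
-- def preprocess_plaintext(plaintext: str) -> list:
--     """处理明文字符串"""
--     plaintext = plaintext.upper().replace(" ", "").replace("J", "I")
--     plaintext_ls = list(plaintext)
--     cur = 0
--     while cur < len(plaintext_ls) - 1:
--         if plaintext_ls[cur] == plaintext_ls[cur + 1]:  # 相同字符插入 X
--             plaintext_ls.insert(cur + 1, 'X')
--         cur += 2
--     if len(plaintext_ls) % 2:  # 补充 X
--         plaintext_ls.append('X')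
--     return plaintext_ls
-- ===== SOURCE B (Python) =====
-- def preprocess_plaintext(plaintext: str) -> list:
--     """处理明文字符串 — single left-to-right pass, no list.insert."""
--     s = plaintext.upper().replace(" ", "").replace("J", "I")
--     out = []
--     i = 0
--     n = len(s)
--     while i < n:
--         c = s[i]
--         if i + 1 < n and s[i + 1] == c:
--             out.append(c)
--             out.append('X')
--             i += 1
--         elif i + 1 < n:
--             out.append(c)
--             out.append(s[i + 1])
--             i += 2
--         else:
--             out.append(c)
--             out.append('X')
--             i += 2
--     return out
-- ===== Notes on version B (the rewrite author's own statement) =====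
-- stated objective: faster
-- what changed: Replaced the mutating scan (list.insert shifts the whole tail on every repeated pair, O(n^2)) by a single left-to-right pass that appends digraphs to an output list, advancing one position on a repeated character.
import Mathlib
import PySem

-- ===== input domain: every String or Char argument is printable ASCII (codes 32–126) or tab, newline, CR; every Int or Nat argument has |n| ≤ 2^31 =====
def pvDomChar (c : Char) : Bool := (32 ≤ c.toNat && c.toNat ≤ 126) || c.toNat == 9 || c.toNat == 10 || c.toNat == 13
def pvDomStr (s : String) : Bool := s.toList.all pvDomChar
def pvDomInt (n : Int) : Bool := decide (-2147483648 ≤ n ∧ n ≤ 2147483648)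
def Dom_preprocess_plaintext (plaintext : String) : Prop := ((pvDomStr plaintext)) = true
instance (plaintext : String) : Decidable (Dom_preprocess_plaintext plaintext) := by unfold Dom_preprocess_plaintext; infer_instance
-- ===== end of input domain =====

-- B replaces A's quadratic mutating scan (list.insert shifts the tail on every repeated pair) by one
-- left-to-right pass appending digraph characters; proved to return the same list.

-- ===== PORT A =====
-- A's while loop: walk cur in steps of 2; on a repeated pair insert 'X' after it (the list grows in place)
def pvAloop (ls : List Char) (cur : Nat) : List Char :=
  if h : cur + 1 < ls.length then
    if ls[cur] == ls[cur + 1] then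
      pvAloop (PySem.List.insert ls ((cur : Int) + 1) 'X') (cur + 2)
    else
      pvAloop ls (cur + 2)
  else ls
termination_by ls.length - cur
decreasing_by
  · simp [PySem.List.length_insert]; omega
  · omega

def preprocess_plaintext (plaintext : String) : List String :=
  let cleaned := PySem.Chars.replace (PySem.Chars.replace
      (PySem.Chars.upper plaintext.toList) [' '] []) ['J'] ['I']
  let ls := pvAloop cleaned 0
  let ls2 := if ls.length % 2 = 1 then ls ++ ['X'] else ls
  ls2.map Char.toString

-- ===== PORT B =====
-- B's single pass: emit a digraph, advancing by 1 on a repeated char, by 2 otherwise; a lone last char pairs with "X"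
def pvBloop : List Char → List String
  | [] => []
  | [c] => [Char.toString c, "X"]
  | c :: d :: rest =>
    if c == d then Char.toString c :: "X" :: pvBloop (d :: rest)
    else Char.toString c :: Char.toString d :: pvBloop rest
termination_by xs => xs.length

def preprocess_plaintext_alt (plaintext : String) : List String :=
  pvBloop (PySem.Chars.replace (PySem.Chars.replace
      (PySem.Chars.upper plaintext.toList) [' '] []) ['J'] ['I'])

-- ===== PRECONDITION & SPEC =====
def Spec_preprocess_plaintext (plaintext : String) (out : List String) : Prop := out = preprocess_plaintext_alt plaintext
instance (plaintext : String) (out : List String) : Decidable (Spec_preprocess_plaintext plaintext out) := by unfold Spec_preprocess_plaintext; infer_instance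

-- ===== CLAIM (what is proved, stated in full; the proofs are below) =====
def Claim_equal_preprocess_plaintext : Prop := ∀ (plaintext : String), Dom_preprocess_plaintext plaintext → Spec_preprocess_plaintext plaintext (preprocess_plaintext plaintext)

-- ===== LEMMAS AND PROOFS =====

-- pure functional form of the suffix that A's loop produces from position cur on
def pvPair : List Char → List Char
  | [] => []
  | [c] => [c]
  | c :: d :: rest => if c == d then c :: 'X' :: pvPair (d :: rest) else c :: d :: pvPair rest
termination_by xs => xs.length

theorem pvPair_short (xs : List Char) (h : xs.length ≤ 1) : pvPair xs = xs := by
  match xs with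
  | [] => simp [pvPair]
  | [c] => simp [pvPair]
  | a :: b :: t => simp at h

theorem pvPair_cons_cons (c d : Char) (rest : List Char) :
    pvPair (c :: d :: rest) = if c == d then c :: 'X' :: pvPair (d :: rest) else c :: d :: pvPair rest := by
  simp [pvPair]

theorem pv_take_one (ls : List Char) (cur : Nat) (h : cur < ls.length) :
    ls.take (cur + 1) = ls.take cur ++ [ls[cur]] := by
  rw [List.take_add, List.drop_eq_getElem_cons h]
  simp only [List.take_succ_cons, List.take_zero]

theorem pv_take_two (ls : List Char) (cur : Nat) (h : cur + 1 < ls.length) :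
    ls.take (cur + 2) = ls.take cur ++ [ls[cur], ls[cur + 1]] := by
  rw [List.take_add,
      List.drop_eq_getElem_cons (show cur < ls.length from by omega),
      List.drop_eq_getElem_cons h]
  simp only [List.take_succ_cons, List.take_zero]

-- invariant of A's loop: the prefix before cur is final, the suffix is paired functionally
theorem pvAloop_eq (ls : List Char) (cur : Nat) :
    pvAloop ls cur = ls.take cur ++ pvPair (ls.drop cur) := by
  induction ls, cur using pvAloop.induct with
  | case1 ls cur h heq ih =>
    rw [pvAloop]
    simp only [dif_pos h, if_pos heq]
    have hins : PySem.List.insert ls ((cur : Int) + 1) 'X'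
        = ls.take (cur + 1) ++ 'X' :: ls.drop (cur + 1) := by
      have h2 := PySem.List.insert_natCast ls (cur + 1) 'X' (by omega)
      push_cast at h2; exact h2
    rw [hins] at ih
    rw [hins, ih, List.take_append, List.drop_append]
    have hA : (ls.take (cur + 1)).length = cur + 1 := by simp; omega
    rw [hA, List.take_of_length_le (by omega : (ls.take (cur+1)).length ≤ cur + 2) ,
        List.drop_of_length_le (by omega : (ls.take (cur+1)).length ≤ cur + 2)]
    rw [List.drop_eq_getElem_cons (show cur < ls.length from by omega),
        List.drop_eq_getElem_cons h, pvPair_cons_cons, if_pos heq,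
        ← List.drop_eq_getElem_cons h]
    rw [pv_take_one ls cur (by omega), show cur + 2 - (cur + 1) = 1 from by omega]
    simp only [List.append_assoc, List.cons_append, List.nil_append,
      List.take_succ_cons, List.take_zero, List.drop_succ_cons, List.drop_zero]
  | case2 ls cur h heq ih =>
    rw [pvAloop]
    simp only [dif_pos h, if_neg heq]
    rw [ih, pv_take_two ls cur h,
        List.drop_eq_getElem_cons (show cur < ls.length from by omega),
        List.drop_eq_getElem_cons h, pvPair_cons_cons, if_neg heq]
    simp
  | case3 ls cur h =>
    rw [pvAloop]
    simp only [dif_neg h]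
    rw [pvPair_short _ (by simp; omega), List.take_append_drop]

-- B's pass equals pvPair followed by A's parity padding and the char→str map
theorem pvBloop_eq (xs : List Char) :
    pvBloop xs = (if (pvPair xs).length % 2 = 1 then pvPair xs ++ ['X'] else pvPair xs).map Char.toString := by
  induction xs using pvBloop.induct with
  | case1 => simp [pvBloop, pvPair]
  | case2 c => simp [pvBloop, pvPair]; rfl
  | case3 c d rest hcd ih =>
    rw [pvBloop, if_pos hcd, pvPair_cons_cons, if_pos hcd]
    simp only [List.length_cons]
    simp only [show ((pvPair (d :: rest)).length + 1 + 1) % 2 = (pvPair (d :: rest)).length % 2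
          from by omega]
    rw [ih]
    by_cases hp : (pvPair (d :: rest)).length % 2 = 1
    · rw [if_pos hp, if_pos hp]; simp only [List.map_cons, List.cons_append]; rfl
    · rw [if_neg hp, if_neg hp]; simp only [List.map_cons]; rfl
  | case4 c d rest hcd ih =>
    rw [pvBloop, if_neg hcd, pvPair_cons_cons, if_neg hcd]
    simp only [List.length_cons]
    simp only [show ((pvPair rest).length + 1 + 1) % 2 = (pvPair rest).length % 2 from by omega]
    rw [ih]
    by_cases hp : (pvPair rest).length % 2 = 1
    · rw [if_pos hp, if_pos hp]; simp only [List.map_cons, List.cons_append]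
    · rw [if_neg hp, if_neg hp]; simp only [List.map_cons]

-- ===== VERDICT (by name: the statement is the Claim_ definition above) =====
theorem preprocess_plaintext_spec : Claim_equal_preprocess_plaintext := by
  intro plaintext _
  unfold Spec_preprocess_plaintext preprocess_plaintext preprocess_plaintext_alt
  dsimp only
  rw [pvAloop_eq, pvBloop_eq]
  simp
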